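-- pv_equiv track=rewrite | github.com/pypi-data/pypi-mirror-345 | packages/megadetector-utils/megadetector_utils-5.0.28-py3-none-any.whl/megadetector/utils/ct_utils.py | split_list_into_n_chunks
-- ===== SOURCE A (Python) =====
-- def split_list_into_n_chunks(L, n, chunk_strategy='greedy'):
--     """
--     Splits the list or tuple L into n equally-sized chunks (some chunks may be one
--     element smaller than others, i.e. len(L) does not have to be a multiple of n).
--
--     chunk_strategy can be "greedy" (default, if there are k samples per chunk, the first
--     k go into the first chunk) or "balanced" (alternate between chunks when pulling
--     items from the list).
--
--     Args:
--         L (list): list to split into chunks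
--         n (int): number of chunks
--         chunk_strategy (str, optiopnal): "greedy" or "balanced"; see above
--
--     Returns:
--         list: list of chunks, each of which is a list
--     """
--
--     if chunk_strategy == 'greedy':
--         k, m = divmod(len(L), n)
--         return list(L[i*k+min(i, m):(i+1)*k+min(i+1, m)] for i in range(n))
--     elif chunk_strategy == 'balanced':
--         chunks = [ [] for _ in range(n) ]
--         for i_item,item in enumerate(L):
--             i_chunk = i_item % n
--             chunks[i_chunk].append(item)
--         return chunks
--     else:
--         raise ValueError('Invalid chunk strategy: {}'.format(chunk_strategy))
-- ===== SOURCE B (Python) =====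
-- def split_list_into_n_chunks(L, n, chunk_strategy='greedy'):
--     if chunk_strategy == 'greedy':
--         k, m = divmod(len(L), n)
--         chunks = []
--         start = 0
--         for i in range(n):
--             size = k + (1 if i < m else 0)
--             chunks.append(list(L[start:start + size]))
--             start += size
--         return chunks
--     elif chunk_strategy == 'balanced':
--         return [[x for j, x in enumerate(L) if j % n == i] for i in range(n)]
--     else:
--         raise ValueError('Invalid chunk strategy: {}'.format(chunk_strategy))
-- ===== Notes on version B (the rewrite author's own statement) =====
-- stated objective: alternative
-- what changed: greedy: the closed-form per-index slice formula i*k+min(i,m) is replaced by a running-pointer loop that advances start by each chunk's size; balanced: the single round-robin pass with n mutable accumulators is replaced by n index-filtering passes, one comprehension per chunk (j % n == i).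
import Mathlib
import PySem

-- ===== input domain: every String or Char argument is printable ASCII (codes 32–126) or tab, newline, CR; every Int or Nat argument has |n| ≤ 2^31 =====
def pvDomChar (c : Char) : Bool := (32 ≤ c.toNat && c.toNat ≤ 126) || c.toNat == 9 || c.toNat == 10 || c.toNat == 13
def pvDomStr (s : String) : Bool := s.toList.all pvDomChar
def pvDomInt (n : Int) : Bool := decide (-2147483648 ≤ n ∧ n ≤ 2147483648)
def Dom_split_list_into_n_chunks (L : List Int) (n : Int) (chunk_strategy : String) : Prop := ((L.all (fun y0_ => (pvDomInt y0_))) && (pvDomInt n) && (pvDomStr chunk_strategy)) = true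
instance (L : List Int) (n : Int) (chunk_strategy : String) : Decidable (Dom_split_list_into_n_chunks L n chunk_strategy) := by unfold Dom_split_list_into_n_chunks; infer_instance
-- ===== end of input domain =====

-- B replaces the greedy closed-form index formula by a running-pointer loop and the balanced
-- round-robin append pass by one index-filtering pass per chunk (objective: alternative).

-- ===== PORT A =====
def split_list_into_n_chunks (L : List Int) (n : Int) (chunk_strategy : String) : List (List Int) :=
  if chunk_strategy = "greedy" then
    -- k, m = divmod(len(L), n)   (n ≠ 0 under Pre_)
    let k := PySem.Int.floordiv (L.length : Int) n
    let m := PySem.Int.mod (L.length : Int) n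
    (PySem.List.pyRange 0 n 1).map (fun i =>
      PySem.List.slice L (some (i * k + min i m)) (some ((i + 1) * k + min (i + 1) m)))
  else if chunk_strategy = "balanced" then
    let init : List (List Int) := (PySem.List.pyRange 0 n 1).map (fun _ => ([] : List Int))
    (PySem.List.enumerate L 0).foldl (fun chunks p =>
      -- chunks[i_item % n].append(item); under Pre_ the index is in range and nonnegative
      chunks.modify (PySem.Int.mod p.1 n).toNat (fun c => c ++ [p.2])) init
  else []  -- raise ValueError: excluded by Pre_

-- ===== PORT B =====
def split_list_into_n_chunks_alt (L : List Int) (n : Int) (chunk_strategy : String) : List (List Int) :=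
  if chunk_strategy = "greedy" then
    let k := PySem.Int.floordiv (L.length : Int) n
    let m := PySem.Int.mod (L.length : Int) n
    ((PySem.List.pyRange 0 n 1).foldl (fun (st : List (List Int) × Int) i =>
        let size := k + (if i < m then (1 : Int) else 0)
        (st.1 ++ [PySem.List.slice L (some st.2) (some (st.2 + size))], st.2 + size))
      (([] : List (List Int)), (0 : Int))).1
  else if chunk_strategy = "balanced" then
    (PySem.List.pyRange 0 n 1).map (fun i =>
      (PySem.List.enumerate L 0).filterMap (fun p =>
        if PySem.Int.mod p.1 n = i then some p.2 else none))
  else []  -- raise ValueError: excluded by Pre_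

-- ===== PRECONDITION & SPEC =====
-- Pre_ excludes exactly the inputs where A raises: an unknown chunk_strategy (ValueError),
-- 'greedy' with n = 0 (ZeroDivisionError), and 'balanced' with n ≤ 0 and L non-empty
-- (ZeroDivisionError / IndexError).
def Pre_split_list_into_n_chunks (L : List Int) (n : Int) (chunk_strategy : String) : Prop :=
  (chunk_strategy = "greedy" ∧ n ≠ 0) ∨ (chunk_strategy = "balanced" ∧ (0 < n ∨ L = []))
instance (L : List Int) (n : Int) (chunk_strategy : String) : Decidable (Pre_split_list_into_n_chunks L n chunk_strategy) := by unfold Pre_split_list_into_n_chunks; infer_instance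
def pvWitness_split_list_into_n_chunks : List Int × Int × String := ([1, 2, 3, 4, 5], 2, "greedy")

def Spec_split_list_into_n_chunks (L : List Int) (n : Int) (chunk_strategy : String) (out : List (List Int)) : Prop := out = split_list_into_n_chunks_alt L n chunk_strategy
instance (L : List Int) (n : Int) (chunk_strategy : String) (out : List (List Int)) : Decidable (Spec_split_list_into_n_chunks L n chunk_strategy out) := by unfold Spec_split_list_into_n_chunks; infer_instance

-- ===== CLAIM (what is proved, stated in full; the proofs are below) =====
def Claim_equal_split_list_into_n_chunks : Prop := ∀ (L : List Int) (n : Int) (chunk_strategy : String), Dom_split_list_into_n_chunks L n chunk_strategy → Pre_split_list_into_n_chunks L n chunk_strategy → Spec_split_list_into_n_chunks L n chunk_strategy (split_list_into_n_chunks L n chunk_strategy)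
-- ===== LEMMAS AND PROOFS =====

-- Greedy: the running-pointer fold starting at a with start = a*k + min a m reproduces the
-- closed-form slices of A for the remaining indices.
theorem greedy_fold (L : List Int) (k m : Int) :
    ∀ (b a : Int) (acc : List (List Int)),
      ((PySem.List.pyRange a b 1).foldl (fun (st : List (List Int) × Int) i =>
          let size := k + (if i < m then (1 : Int) else 0)
          (st.1 ++ [PySem.List.slice L (some st.2) (some (st.2 + size))], st.2 + size))
        (acc, a * k + min a m)).1
      = acc ++ (PySem.List.pyRange a b 1).map (fun i =>
          PySem.List.slice L (some (i * k + min i m)) (some ((i + 1) * k + min (i + 1) m))) := by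
  intro b a acc
  generalize hd : (b - a).toNat = d
  induction d generalizing a acc with
  | zero =>
    rw [PySem.List.pyRange_one_eq_nil (by omega)]
    simp
  | succ d ih =>
    have hab : a < b := by omega
    rw [PySem.List.pyRange_one_cons hab]
    simp only [List.foldl_cons, List.map_cons]
    have hstart : a * k + min a m + (k + (if a < m then (1 : Int) else 0))
        = (a + 1) * k + min (a + 1) m := by
      split_ifs with h <;> ring_nf <;> omega
    rw [hstart, ih (a + 1) _ (by omega)]
    simp

-- Balanced: the round-robin fold over enumerate L equals per-index filtering appended to the
-- current chunk contents.
theorem balanced_fold (n : Int) (hn : 0 < n) :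
    ∀ (L : List Int) (s : Int) (C : List (List Int)), C.length = n.toNat →
      (PySem.List.enumerate L s).foldl (fun chunks p =>
          chunks.modify (PySem.Int.mod p.1 n).toNat (fun c => c ++ [p.2])) C
      = C.mapIdx (fun i c => c ++ (PySem.List.enumerate L s).filterMap (fun p =>
          if PySem.Int.mod p.1 n = (i : Int) then some p.2 else none)) := by
  intro L
  induction L with
  | nil =>
    intro s C hC
    simp only [PySem.List.enumerate_nil, List.filterMap_nil, List.foldl_nil, List.append_nil]
    apply List.ext_getElem <;> simp
  | cons x L' ih =>
    intro s C hC
    rw [PySem.List.enumerate_cons]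
    simp only [List.foldl_cons, List.filterMap_cons]
    rw [ih (s + 1) _ (by rw [List.length_modify]; exact hC)]
    have h0 : 0 ≤ PySem.Int.mod s n := PySem.Int.mod_nonneg s hn
    apply List.ext_getElem
    · simp [List.length_modify]
    · intro i h1 h2
      simp only [List.getElem_mapIdx, List.getElem_modify]
      by_cases hm : PySem.Int.mod s n = (i : Int)
      · have ht : (PySem.Int.mod s n).toNat = i := by omega
        simp [hm]
      · have ht : (PySem.Int.mod s n).toNat ≠ i := by omega
        simp [ht, hm]

-- ===== VERDICT (by name: the statement is the Claim_ definition above) =====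
theorem split_list_into_n_chunks_spec : Claim_equal_split_list_into_n_chunks := by
  intro L n cs _ hpre
  unfold Spec_split_list_into_n_chunks split_list_into_n_chunks split_list_into_n_chunks_alt
  rcases hpre with ⟨hg, hn⟩ | ⟨hb, hpos⟩
  · subst hg
    simp only [reduceIte]
    rcases lt_or_gt_of_ne hn with hlt | hgt
    · rw [PySem.List.pyRange_one_eq_nil (by omega)]
      simp
    · have hm : (0 : Int) * (PySem.Int.floordiv (L.length : Int) n)
          + min 0 (PySem.Int.mod (L.length : Int) n) = 0 := by
        have := PySem.Int.mod_nonneg (L.length : Int) hgt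
        omega
      have hge := greedy_fold L (PySem.Int.floordiv (L.length : Int) n)
        (PySem.Int.mod (L.length : Int) n) n 0 []
      rw [hm] at hge
      rw [hge]
      simp
  · subst hb
    have hbg : ("balanced" : String) ≠ "greedy" := by decide
    simp only [if_neg hbg, reduceIte]
    rcases hpos with hgt | hnil
    · rw [balanced_fold n hgt L 0 _ (by simp [PySem.List.length_pyRange_one])]
      apply List.ext_getElem
      · simp
      · intro i h1 h2
        simp only [List.getElem_mapIdx, List.getElem_map, PySem.List.getElem_pyRange_one]
        simp
    · subst hnil
      simp [PySem.List.enumerate_nil]
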